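-- pv_equiv track=rewrite | github.com/sigurdvaa/adventofcode | 2015/19-Medicine-for-Rudolph.py | possible_replacements
-- ===== SOURCE A (Python) =====
-- def possible_replacements(replacements: dict, molecule: str):
--     possible = set()
--     for key in replacements:
--         size = len(key)
--         for i in range(len(molecule) + 1 - size):
--             if molecule[i : i + size] == key:
--                 for r in replacements[key]:
--                     possible.add(molecule[:i] + r + molecule[i + size :])
--
--     return possible
-- ===== SOURCE B (Python) =====
-- def possible_replacements(replacements: dict, molecule: str):
--     # Build, once per distinct key length m, an index mapping each length-m
--     # substring of molecule to its (ascending) list of match positions; each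
--     # key then costs one dictionary lookup instead of a scan of the molecule.
--     possible = set()
--     n = len(molecule)
--     occ = {}
--     for key in replacements:
--         m = len(key)
--         if m not in occ:
--             index = {}
--             for i in range(n + 1 - m):
--                 index.setdefault(molecule[i:i + m], []).append(i)
--             occ[m] = index
--     for key, subs in replacements.items():
--         m = len(key)
--         for i in occ[m].get(key, []):
--             for r in subs:
--                 possible.add(molecule[:i] + r + molecule[i + m:])
--     return possible
-- ===== Notes on version B (the rewrite author's own statement) =====
-- stated objective: faster
-- what changed: B makes one pass per distinct key length over the molecule to build a hash index from each substring of that length to its list of match positions, then answers every key with a single dictionary lookup, removing A's per-key scan-and-slice of the whole molecule.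
import Mathlib
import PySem

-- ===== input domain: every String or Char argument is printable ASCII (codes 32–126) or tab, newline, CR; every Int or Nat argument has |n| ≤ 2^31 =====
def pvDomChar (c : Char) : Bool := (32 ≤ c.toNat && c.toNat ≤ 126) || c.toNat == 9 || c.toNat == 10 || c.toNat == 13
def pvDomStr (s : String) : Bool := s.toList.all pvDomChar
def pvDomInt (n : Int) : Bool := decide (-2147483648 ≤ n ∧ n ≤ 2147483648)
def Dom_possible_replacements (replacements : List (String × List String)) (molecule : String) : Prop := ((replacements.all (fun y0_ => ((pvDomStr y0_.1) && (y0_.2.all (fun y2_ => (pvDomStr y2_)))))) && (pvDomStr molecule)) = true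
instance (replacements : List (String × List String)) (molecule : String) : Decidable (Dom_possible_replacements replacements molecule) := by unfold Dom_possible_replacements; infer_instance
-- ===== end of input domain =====

-- B builds, once per distinct key length, an index from each substring of that length to its
-- match positions, so every key costs one dictionary lookup instead of a scan of the molecule.


-- dict lookup replacements[key]: first matching entry (exact for a Python dict)
def pyDictGet (replacements : List (String × List String)) (key : String) : List String :=
  ((replacements.find? (fun p => p.1 == key)).map Prod.snd).getD []

-- ===== PORT A =====
def possible_replacements (replacements : List (String × List String)) (molecule : String) : List String :=
  replacements.foldl (fun possible kv =>
    (PySem.List.pyRange 0 (PySem.Str.len molecule + 1 - PySem.Str.len kv.1) 1).foldl (fun possible i =>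
      if PySem.Str.slice molecule (some i) (some (i + PySem.Str.len kv.1)) = kv.1 then
        (pyDictGet replacements kv.1).foldl (fun possible r =>
          PySem.Set.add possible
            (PySem.Str.slice molecule none (some i) ++ r ++
              PySem.Str.slice molecule (some (i + PySem.Str.len kv.1)) none)) possible
      else possible) possible) []

-- ===== PORT B =====
-- Source B's inner index-building loop: map each length-m substring of molecule to its match
-- positions; index.setdefault(s, []).append(i) is d[s] = d.get(s, []) + [i], i.e. Dict.modify
def pvIndex (molecule : String) (n m : Int) : PySem.Dict String (List Int) :=
  (PySem.List.pyRange 0 (n + 1 - m) 1).foldl (fun index i =>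
    index.modify (PySem.Str.slice molecule (some i) (some (i + m))) [] (· ++ [i]))
    PySem.Dict.empty

def possible_replacements_alt (replacements : List (String × List String)) (molecule : String) : List String :=
  replacements.foldl (fun possible kv =>
    -- occ[len(key)] raises no KeyError: every key length was indexed in the first pass
    (((replacements.foldl (fun occ kv =>
          if occ.contains (PySem.Str.len kv.1) then occ
          else occ.insert (PySem.Str.len kv.1)
            (pvIndex molecule (PySem.Str.len molecule) (PySem.Str.len kv.1)))
        PySem.Dict.empty).getD (PySem.Str.len kv.1) PySem.Dict.empty).getD kv.1 []).foldl
      (fun possible i =>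
        kv.2.foldl (fun p r =>
          PySem.Set.add p
            (PySem.Str.slice molecule none (some i) ++ r ++
              PySem.Str.slice molecule (some (i + PySem.Str.len kv.1)) none)) possible) possible) []

-- ===== PRECONDITION & SPEC =====
-- Pre_ excludes association lists with duplicate keys: the parameter is a Python dict, which
-- cannot hold two entries with the same key, so such lists represent no actual input of A.
def Pre_possible_replacements (replacements : List (String × List String)) (molecule : String) : Prop :=
  (replacements.map Prod.fst).Nodup
instance (replacements : List (String × List String)) (molecule : String) : Decidable (Pre_possible_replacements replacements molecule) := by unfold Pre_possible_replacements; infer_instance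

def pvWitness_possible_replacements : (List (String × List String)) × String :=
  ([("H", ["HO", "OH"]), ("O", ["HH"])], "HOH")

def Spec_possible_replacements (replacements : List (String × List String)) (molecule : String) (out : List String) : Prop := out = possible_replacements_alt replacements molecule
instance (replacements : List (String × List String)) (molecule : String) (out : List String) : Decidable (Spec_possible_replacements replacements molecule out) := by unfold Spec_possible_replacements; infer_instance

-- ===== CLAIM (what is proved, stated in full; the proofs are below) =====
def Claim_equal_possible_replacements : Prop := ∀ (replacements : List (String × List String)) (molecule : String), Dom_possible_replacements replacements molecule → Pre_possible_replacements replacements molecule → Spec_possible_replacements replacements molecule (possible_replacements replacements molecule)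

-- ===== LEMMAS AND PROOFS =====

-- looking a key up in the index yields exactly the positions whose substring is the key
lemma idx_fold_getD (molecule : String) (m : Int) (key : String) :
    ∀ (l : List Int) (d : PySem.Dict String (List Int)),
      (l.foldl (fun index i =>
        index.modify (PySem.Str.slice molecule (some i) (some (i + m))) [] (· ++ [i])) d).getD key []
      = d.getD key [] ++ l.filter (fun i => PySem.Str.slice molecule (some i) (some (i + m)) = key) := by
  intro l
  induction l with
  | nil => intro d; simp
  | cons i t ih =>
    intro d
    simp only [List.foldl_cons, List.filter_cons]
    rw [ih]
    by_cases hc : PySem.Str.slice molecule (some i) (some (i + m)) = key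
    · rw [hc, PySem.Dict.getD_modify, if_pos rfl, if_pos (by simp)]
      simp
    · rw [PySem.Dict.getD_modify, if_neg (fun h => hc h.symm), if_neg (by simp [hc])]

lemma idx_getD (molecule : String) (n m : Int) (key : String) :
    (pvIndex molecule n m).getD key []
      = (PySem.List.pyRange 0 (n + 1 - m) 1).filter
          (fun i => PySem.Str.slice molecule (some i) (some (i + m)) = key) := by
  rw [pvIndex, idx_fold_getD]
  simp

-- every value stored in occ is the index for its length
lemma occ_inv (molecule : String) (n : Int) :
    ∀ (l : List (String × List String)) (occ : PySem.Dict Int (PySem.Dict String (List Int))),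
      (∀ m' v, occ.get? m' = some v → v = pvIndex molecule n m') →
      ∀ m' v, (l.foldl (fun occ kv =>
          if occ.contains (PySem.Str.len kv.1) then occ
          else occ.insert (PySem.Str.len kv.1) (pvIndex molecule n (PySem.Str.len kv.1))) occ).get? m'
        = some v → v = pvIndex molecule n m' := by
  intro l
  induction l with
  | nil => intro occ hocc; exact hocc
  | cons kv t ih =>
    intro occ hocc
    simp only [List.foldl_cons]
    by_cases hc : occ.contains (PySem.Str.len kv.1)
    · rw [if_pos hc]
      exact ih occ hocc
    · rw [if_neg hc]
      apply ih
      intro m' v hv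
      rw [PySem.Dict.get?_insert] at hv
      by_cases hm : m' = PySem.Str.len kv.1
      · rw [if_pos hm] at hv
        cases hv
        rw [hm]
      · rw [if_neg hm] at hv
        exact hocc m' v hv

-- once a length is in occ it stays in occ
lemma occ_contains_mono (molecule : String) (n : Int) :
    ∀ (l : List (String × List String)) (occ : PySem.Dict Int (PySem.Dict String (List Int))) (m' : Int),
      occ.contains m' = true →
      (l.foldl (fun occ kv =>
          if occ.contains (PySem.Str.len kv.1) then occ
          else occ.insert (PySem.Str.len kv.1) (pvIndex molecule n (PySem.Str.len kv.1))) occ).contains m' = true := by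
  intro l
  induction l with
  | nil => intro occ m' h; exact h
  | cons kv t ih =>
    intro occ m' h
    simp only [List.foldl_cons]
    by_cases hc : occ.contains (PySem.Str.len kv.1)
    · rw [if_pos hc]; exact ih occ m' h
    · rw [if_neg hc]
      exact ih _ m' (by rw [PySem.Dict.contains_insert, h]; simp)

-- every key length of the list ends up in occ
lemma occ_contains_of_mem (molecule : String) (n : Int) :
    ∀ (l : List (String × List String)) (occ : PySem.Dict Int (PySem.Dict String (List Int))) (kv : String × List String),
      kv ∈ l →
      (l.foldl (fun occ kv =>
          if occ.contains (PySem.Str.len kv.1) then occ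
          else occ.insert (PySem.Str.len kv.1) (pvIndex molecule n (PySem.Str.len kv.1))) occ).contains
        (PySem.Str.len kv.1) = true := by
  intro l
  induction l with
  | nil => intro occ kv h; cases h
  | cons p t ih =>
    intro occ kv h
    simp only [List.foldl_cons]
    rcases List.mem_cons.mp h with h1 | h1
    · subst h1
      by_cases hc : occ.contains (PySem.Str.len kv.1)
      · rw [if_pos hc]
        exact occ_contains_mono molecule n t occ _ hc
      · rw [if_neg hc]
        exact occ_contains_mono molecule n t _ _ (PySem.Dict.contains_insert_self _ _ _)
    · by_cases hc : occ.contains (PySem.Str.len p.1)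
      · rw [if_pos hc]; exact ih occ kv h1
      · rw [if_neg hc]; exact ih _ kv h1

-- the occ lookup in pass 2 returns the index for the key's length
lemma occ_getD (molecule : String) (n : Int) (replacements : List (String × List String))
    (kv : String × List String) (hkv : kv ∈ replacements) :
    ((replacements.foldl (fun occ kv =>
        if occ.contains (PySem.Str.len kv.1) then occ
        else occ.insert (PySem.Str.len kv.1) (pvIndex molecule n (PySem.Str.len kv.1)))
        PySem.Dict.empty).getD (PySem.Str.len kv.1) PySem.Dict.empty)
      = pvIndex molecule n (PySem.Str.len kv.1) := by
  have hcont := occ_contains_of_mem molecule n replacements PySem.Dict.empty kv hkv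
  rw [PySem.Dict.contains_eq_isSome_get?] at hcont
  obtain ⟨v, hv⟩ := Option.isSome_iff_exists.mp hcont
  rw [PySem.Dict.getD_eq_get?_getD, hv]
  exact occ_inv molecule n replacements PySem.Dict.empty
    (fun m' v h => by rw [PySem.Dict.get?_empty] at h; cases h) _ v hv

-- first-match lookup in an association list with distinct keys returns the entry's own value
lemma getD_of_mem_nodup {ν : Type} (d : List (String × ν)) (k : String) (v dflt : ν)
    (h : (d.map Prod.fst).Nodup) (hm : (k, v) ∈ d) :
    ((d.find? (fun p => p.1 == k)).map Prod.snd).getD dflt = v := by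
  induction d with
  | nil => cases hm
  | cons p d ih =>
    simp only [List.map_cons, List.nodup_cons] at h
    rcases List.mem_cons.mp hm with h1 | h1
    · subst h1
      simp [List.find?]
    · have hne : p.1 ≠ k := by
        intro he
        exact h.1 (he ▸ (List.mem_map.mpr ⟨(k, v), h1, rfl⟩))
      have := ih h.2 h1
      simpa [List.find?_cons, hne] using this

-- ===== VERDICT (by name: the statement is the Claim_ definition above) =====
theorem possible_replacements_spec : Claim_equal_possible_replacements := by
  intro replacements molecule _ hpre
  unfold Spec_possible_replacements
  unfold possible_replacements possible_replacements_alt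
  apply PySem.List.foldl_congr_mem
  intro acc kv hkv
  have hget : pyDictGet replacements kv.1 = kv.2 := by
    unfold pyDictGet
    exact getD_of_mem_nodup replacements kv.1 kv.2 [] hpre (by exact hkv)
  rw [hget, occ_getD molecule (PySem.Str.len molecule) replacements kv hkv,
    idx_getD molecule (PySem.Str.len molecule) (PySem.Str.len kv.1) kv.1]
  rw [PySem.List.foldl_ite_eq_foldl_filter]
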